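-- pv_equiv track=rewrite | github.com/eigentaylor/historical-PVI | predictive_states.py | find_longest_streak
-- ===== SOURCE A (Python) =====
-- def consecutive_ranges(years_list):
--     if not years_list:
--         return []
--     years = sorted(years_list)
--     ranges = []
--     start = years[0]
--     end = years[0]
--     for y in years[1:]:
--         # elections occur every 4 years, treat years separated by 4 as consecutive
--         if y == end + 4:
--             end = y
--         else:
--             ranges.append((start, end))
--             start = y
--             end = y
--     ranges.append((start, end))
--     return ranges
--
-- def find_longest_streak(years_list):
--     ranges = consecutive_ranges(years_list)
--     if not ranges:
--         return 0, []
--     max_len = 0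
--     best = []
--     for (a, b) in ranges:
--         length = (b - a) // 4 + 1
--         if length > max_len:
--             max_len = length
--             best = [(int(a), int(b))]
--         elif length == max_len:
--             best.append((int(a), int(b)))
--     return max_len, best
-- ===== SOURCE B (Python) =====
-- def find_longest_streak(years_list):
--     if not years_list:
--         return 0, []
--     years = sorted(years_list)
--     start = end = years[0]
--     max_len = 0
--     best = []
--
--     def finalize(start, end, max_len, best):
--         length = (end - start) // 4 + 1
--         if length > max_len:
--             return length, [(int(start), int(end))]
--         if length == max_len:
--             return max_len, best + [(int(start), int(end))]
--         return max_len, best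
--
--     for y in years[1:]:
--         if y == end + 4:
--             end = y
--         else:
--             max_len, best = finalize(start, end, max_len, best)
--             start = end = y
--     return finalize(start, end, max_len, best)
-- ===== Notes on version B (the rewrite author's own statement) =====
-- stated objective: simpler
-- what changed: Fuses A's two phases (build an intermediate ranges list, then scan it for the longest runs) into one pass over the sorted years that maintains the current run and the best/max accumulator directly, eliminating the ranges list.
import Mathlib
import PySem

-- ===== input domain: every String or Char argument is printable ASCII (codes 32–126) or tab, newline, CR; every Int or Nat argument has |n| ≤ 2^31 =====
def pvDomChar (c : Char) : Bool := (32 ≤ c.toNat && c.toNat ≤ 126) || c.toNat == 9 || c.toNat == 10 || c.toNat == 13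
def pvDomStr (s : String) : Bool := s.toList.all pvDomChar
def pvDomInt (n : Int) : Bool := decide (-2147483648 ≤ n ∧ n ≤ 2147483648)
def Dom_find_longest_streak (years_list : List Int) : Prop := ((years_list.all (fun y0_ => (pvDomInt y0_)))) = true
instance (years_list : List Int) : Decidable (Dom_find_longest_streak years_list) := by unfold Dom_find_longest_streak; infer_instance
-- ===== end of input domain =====

-- B fuses A's two phases (intermediate ranges list + scan) into one pass over the
-- sorted years maintaining the best/max accumulator directly (objective: simpler).


-- ===== PORT A =====
-- the for-loop of consecutive_ranges: state (start, end, ranges); trailing append folded into the base case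
def pvLoopA : List Int → Int → Int → List (Int × Int) → List (Int × Int)
  | [], st, en, rs => rs ++ [(st, en)]
  | y :: t, st, en, rs =>
    if y = en + 4 then pvLoopA t st y rs else pvLoopA t y y (rs ++ [(st, en)])

def consecutive_ranges (years_list : List Int) : List (Int × Int) :=
  if years_list = [] then []
  else
    match PySem.List.sorted years_list (fun x => x) false with
    | [] => []  -- unreachable totality guard (sorted of a nonempty list is nonempty)
    | h :: t => pvLoopA t h h []

-- body of A's second for-loop (length = (b - a) // 4 + 1, then the if/elif chain)
def pvStepA (acc : Int × List (Int × Int)) (r : Int × Int) : Int × List (Int × Int) :=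
  let length := PySem.Int.floordiv (r.2 - r.1) 4 + 1
  if length > acc.1 then (length, [(r.1, r.2)])
  else if length = acc.1 then (acc.1, acc.2 ++ [(r.1, r.2)])
  else acc

def find_longest_streak (years_list : List Int) : Int × (List (Int × Int)) :=
  let ranges := consecutive_ranges years_list
  if ranges = [] then (0, [])
  else ranges.foldl pvStepA (0, [])

-- ===== PORT B =====
-- Source B's finalize helper
def pvFinalize (st en maxLen : Int) (best : List (Int × Int)) : Int × List (Int × Int) :=
  let length := PySem.Int.floordiv (en - st) 4 + 1
  if length > maxLen then (length, [(st, en)])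
  else if length = maxLen then (maxLen, best ++ [(st, en)])
  else (maxLen, best)

-- Source B's single fused loop: state (start, end, max_len, best); final finalize in the base case
def pvLoopB : List Int → Int → Int → Int → List (Int × Int) → Int × List (Int × Int)
  | [], st, en, m, b => pvFinalize st en m b
  | y :: t, st, en, m, b =>
    if y = en + 4 then pvLoopB t st y m b
    else
      let p := pvFinalize st en m b
      pvLoopB t y y p.1 p.2

def find_longest_streak_alt (years_list : List Int) : Int × (List (Int × Int)) :=
  if years_list = [] then (0, [])
  else
    match PySem.List.sorted years_list (fun x => x) false with
    | [] => (0, [])  -- unreachable totality guard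
    | h :: t => pvLoopB t h h 0 []

-- ===== PRECONDITION & SPEC =====
def Spec_find_longest_streak (years_list : List Int) (out : Int × (List (Int × Int))) : Prop := out = find_longest_streak_alt years_list
instance (years_list : List Int) (out : Int × (List (Int × Int))) : Decidable (Spec_find_longest_streak years_list out) := by unfold Spec_find_longest_streak; infer_instance

-- ===== CLAIM (what is proved, stated in full; the proofs are below) =====
def Claim_equal_find_longest_streak : Prop := ∀ (years_list : List Int), Dom_find_longest_streak years_list → Spec_find_longest_streak years_list (find_longest_streak years_list)

-- ===== LEMMAS AND PROOFS =====

theorem pvFinalize_eq_step (st en m : Int) (b : List (Int × Int)) :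
    pvFinalize st en m b = pvStepA (m, b) (st, en) := rfl

theorem pvLoopA_ne_nil : ∀ (ys : List Int) (st en : Int) (rs : List (Int × Int)),
    pvLoopA ys st en rs ≠ [] := by
  intro ys
  induction ys with
  | nil => intro st en rs; simp [pvLoopA]
  | cons y t ih =>
    intro st en rs
    simp only [pvLoopA]
    split
    · exact ih st y rs
    · exact ih y y (rs ++ [(st, en)])

-- the fused loop computes the fold of A's second phase over A's ranges
theorem pvLoopB_eq : ∀ (ys : List Int) (st en : Int) (rs : List (Int × Int)),
    pvLoopB ys st en (rs.foldl pvStepA (0, [])).1 (rs.foldl pvStepA (0, [])).2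
      = (pvLoopA ys st en rs).foldl pvStepA (0, []) := by
  intro ys
  induction ys with
  | nil =>
    intro st en rs
    simp [pvLoopA, pvLoopB, pvFinalize_eq_step, List.foldl_append]
  | cons y t ih =>
    intro st en rs
    simp only [pvLoopA, pvLoopB]
    split
    · exact ih st y rs
    · have h := ih y y (rs ++ [(st, en)])
      simpa [pvFinalize_eq_step, List.foldl_append] using h

-- ===== VERDICT (by name: the statement is the Claim_ definition above) =====
theorem find_longest_streak_spec : Claim_equal_find_longest_streak := by
  intro years_list _
  unfold Spec_find_longest_streak find_longest_streak find_longest_streak_alt consecutive_ranges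
  by_cases hnil : years_list = []
  · simp [hnil]
  · simp only [hnil, if_false]
    cases hs : PySem.List.sorted years_list (fun x => x) false with
    | nil =>
      exfalso
      have := PySem.List.sorted_perm (xs := years_list) (key := fun x => x) (rev := false)
      rw [hs] at this
      exact hnil (this.symm.eq_nil)
    | cons h t =>
      have hne := pvLoopA_ne_nil t h h []
      simp only [hne, if_false]
      have := pvLoopB_eq t h h []
      simpa using this.symm
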